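-- pv_equiv track=rewrite | github.com/bitsofbits/advent_of_code | 2021/day_19/pythonimp/implementation.py | find_dists
-- ===== SOURCE A (Python) =====
-- from functools import cache
--
-- def find_dists(points, max_offset=1500, n=12):
--     dists = []
--     key_points = []
--     cache
--     for i, p1 in enumerate(points):
--         x1, y1, z1 = p1
--         kdists = []
--         for j, p2 in enumerate(points):
--             x2, y2, z2 = p2
--             d = (x1 - x2) ** 2 + (y1 - y2) ** 2 + (z1 - z2) ** 2
--             if j > i:
--                 dists.append(d)
--             kdists.append(d)
--         key_points.append((p1, kdists))
--
--     return dists, key_points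
-- ===== SOURCE B (Python) =====
-- def find_dists(points, max_offset=1500, n=12):
--     def sq(p, q):
--         return (p[0] - q[0]) ** 2 + (p[1] - q[1]) ** 2 + (p[2] - q[2]) ** 2
--
--     def upper(pts):
--         # squared distances for all pairs, i-major with j > i, by structural recursion
--         if not pts:
--             return []
--         head, tail = pts[0], pts[1:]
--         return [sq(head, q) for q in tail] + upper(tail)
--
--     key_points = [(p, [sq(p, q) for q in points]) for p in points]
--     return upper(points), key_points
-- ===== Notes on version B (the rewrite author's own statement) =====
-- stated objective: alternative
-- what changed: Replaces A's nested enumerate loops with j>i filtering and mutable accumulators by a structural recursion over list suffixes that emits each upper-triangle distance list directly, plus comprehension-built rows for key_points.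
import Mathlib
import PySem

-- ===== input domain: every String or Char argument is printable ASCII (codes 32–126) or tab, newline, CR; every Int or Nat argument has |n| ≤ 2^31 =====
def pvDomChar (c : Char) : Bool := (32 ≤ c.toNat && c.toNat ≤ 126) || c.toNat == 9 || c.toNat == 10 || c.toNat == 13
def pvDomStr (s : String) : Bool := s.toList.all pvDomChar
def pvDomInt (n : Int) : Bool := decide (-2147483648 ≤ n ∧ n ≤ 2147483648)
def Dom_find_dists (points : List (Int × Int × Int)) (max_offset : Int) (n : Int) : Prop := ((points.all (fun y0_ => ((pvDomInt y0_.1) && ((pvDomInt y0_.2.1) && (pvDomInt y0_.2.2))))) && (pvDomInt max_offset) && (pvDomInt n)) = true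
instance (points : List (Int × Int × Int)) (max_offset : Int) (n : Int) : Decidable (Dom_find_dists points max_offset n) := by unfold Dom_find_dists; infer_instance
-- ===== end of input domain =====

-- B replaces A's quadratic re-computation loop shape by a structural recursion over suffixes
-- for the upper-triangle list plus map comprehensions for the rows (objective: alternative decomposition).


-- ===== PORT A =====
-- inner loop body: `for j, p2 in enumerate(points): … if j > i: dists.append(d); kdists.append(d)`
def pvInnerStep (i x1 y1 z1 : Int) (st2 : List Int × List Int) (jp : Int × (Int × Int × Int)) : List Int × List Int :=
  let j := jp.1
  let p2 := jp.2
  let d := (x1 - p2.1) ^ 2 + (y1 - p2.2.1) ^ 2 + (z1 - p2.2.2) ^ 2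
  ((if j > i then st2.1 ++ [d] else st2.1), st2.2 ++ [d])

-- outer loop body: `for i, p1 in enumerate(points): … key_points.append((p1, kdists))`
def pvOuterStep (points : List (Int × Int × Int))
    (st : List Int × List ((Int × Int × Int) × List Int)) (ip : Int × (Int × Int × Int)) :
    List Int × List ((Int × Int × Int) × List Int) :=
  let i := ip.1
  let p1 := ip.2
  let inner := (PySem.List.enumerate points 0).foldl (pvInnerStep i p1.1 p1.2.1 p1.2.2) (st.1, [])
  (inner.1, st.2 ++ [(p1, inner.2)])

def find_dists (points : List (Int × Int × Int)) (max_offset : Int) (n : Int) :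
    List Int × (List ((Int × Int × Int) × List Int)) :=
  (PySem.List.enumerate points 0).foldl (pvOuterStep points) ([], [])

-- ===== PORT B =====
def pvSq (p q : Int × Int × Int) : Int :=
  (p.1 - q.1) ^ 2 + (p.2.1 - q.2.1) ^ 2 + (p.2.2 - q.2.2) ^ 2

def pvUpper : List (Int × Int × Int) → List Int
  | [] => []
  | h :: t => t.map (fun q => pvSq h q) ++ pvUpper t

def find_dists_alt (points : List (Int × Int × Int)) (max_offset : Int) (n : Int) :
    List Int × (List ((Int × Int × Int) × List Int)) :=
  (pvUpper points, points.map (fun p => (p, points.map (fun q => pvSq p q))))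

-- ===== PRECONDITION & SPEC =====
def Spec_find_dists (points : List (Int × Int × Int)) (max_offset : Int) (n : Int) (out : List Int × (List ((Int × Int × Int) × List Int))) : Prop := out = find_dists_alt points max_offset n
instance (points : List (Int × Int × Int)) (max_offset : Int) (n : Int) (out : List Int × (List ((Int × Int × Int) × List Int))) : Decidable (Spec_find_dists points max_offset n out) := by unfold Spec_find_dists; infer_instance

-- ===== CLAIM (what is proved, stated in full; the proofs are below) =====
def Claim_equal_find_dists : Prop := ∀ (points : List (Int × Int × Int)) (max_offset : Int) (n : Int), Dom_find_dists points max_offset n → Spec_find_dists points max_offset n (find_dists points max_offset n)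

-- ===== LEMMAS AND PROOFS =====

-- the `dists` entries contributed by the inner loop at outer index i, scanning from index k
def pvInnerD (i : Int) (p1 : Int × Int × Int) : List (Int × Int × Int) → Int → List Int
  | [], _ => []
  | q :: t, k => (if k > i then [pvSq p1 q] else []) ++ pvInnerD i p1 t (k + 1)

theorem innerFold_eq (i : Int) (p1 : Int × Int × Int) :
    ∀ (l : List (Int × Int × Int)) (k : Int) (D K : List Int),
      (PySem.List.enumerate l k).foldl (pvInnerStep i p1.1 p1.2.1 p1.2.2) (D, K)
        = (D ++ pvInnerD i p1 l k, K ++ l.map (fun q => pvSq p1 q)) := by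
  intro l
  induction l with
  | nil => intro k D K; simp [PySem.List.enumerate_nil, pvInnerD]
  | cons q t ih =>
      intro k D K
      rw [PySem.List.enumerate_cons]
      simp only [List.foldl_cons, pvInnerStep, pvInnerD, List.map_cons]
      by_cases h : k > i
      · simp only [if_pos h, ih]
        simp [pvSq, List.append_assoc]
      · simp only [if_neg h, ih]
        simp [pvSq, List.append_assoc]

theorem pvInnerD_eq_drop (i : Int) (p1 : Int × Int × Int) :
    ∀ (l : List (Int × Int × Int)) (k : Int),
      pvInnerD i p1 l k = (l.drop (i + 1 - k).toNat).map (fun q => pvSq p1 q) := by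
  intro l
  induction l with
  | nil => intro k; simp [pvInnerD]
  | cons q t ih =>
      intro k
      by_cases h : k > i
      · have h0 : (i + 1 - k).toNat = 0 := by omega
        have h0' : (i - k).toNat = 0 := by omega
        simp [pvInnerD, if_pos h, h0, ih, h0']
      · obtain ⟨m, hm⟩ : ∃ m : Nat, (i + 1 - k).toNat = m + 1 := ⟨(i - k).toNat, by omega⟩
        have hm' : (i + 1 - (k + 1)).toNat = m := by omega
        rw [pvInnerD, if_neg h, ih, hm', hm, List.drop_succ_cons]
        simp

theorem outerFold_eq (points : List (Int × Int × Int)) :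
    ∀ (l : List (Int × Int × Int)) (k : Int), 0 ≤ k → points.drop k.toNat = l →
      ∀ (D : List Int) (KP : List ((Int × Int × Int) × List Int)),
      (PySem.List.enumerate l k).foldl (pvOuterStep points) (D, KP)
        = (D ++ pvUpper l, KP ++ l.map (fun p => (p, points.map (fun q => pvSq p q)))) := by
  intro l
  induction l with
  | nil => intro k _ _ D KP; simp [PySem.List.enumerate_nil, pvUpper]
  | cons p1 t ih =>
      intro k hk hdrop D KP
      rw [PySem.List.enumerate_cons]
      simp only [List.foldl_cons]
      have hstep : pvOuterStep points (D, KP) (k, p1)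
          = (D ++ (t.map (fun q => pvSq p1 q)), KP ++ [(p1, points.map (fun q => pvSq p1 q))]) := by
        have hinner := innerFold_eq k p1 points 0 D []
        have hdropt : points.drop (k + 1 - 0).toNat = t := by
          have : (k + 1 - 0).toNat = k.toNat + 1 := by omega
          rw [this, ← List.drop_drop, hdrop]
          simp
        simp only [pvOuterStep, hinner, pvInnerD_eq_drop, hdropt]
        simp
      rw [hstep]
      have hdrop' : points.drop (k + 1).toNat = t := by
        have : (k + 1).toNat = k.toNat + 1 := by omega
        rw [this, ← List.drop_drop, hdrop]; simp
      rw [ih (k + 1) (by omega) hdrop']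
      simp [pvUpper, List.append_assoc]

-- ===== VERDICT (by name: the statement is the Claim_ definition above) =====
theorem find_dists_spec : Claim_equal_find_dists := by
  intro points max_offset n _
  show find_dists points max_offset n = find_dists_alt points max_offset n
  unfold find_dists find_dists_alt
  rw [outerFold_eq points points 0 (by omega) (by simp)]
  simp
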